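-- pv_equiv track=rewrite | github.com/juyongc/Up-Algorithms | PROG_주식가격.py | solution
-- ===== SOURCE A (Python) =====
-- def solution(prices):
--     answer = [0] * len(prices)  # 정답 리스트
--     stack = []                  # 안떨어진 가격 인덱스
--     stack.append(0)
--     now = 1
--     # 마지막 인덱스까지 비교
--     while now < len(prices):
--         cur = prices[now]       # 현재 가격
--         # 모든 answer[스택값] += 1
--         for num in stack:
--             answer[num] += 1
--         # 스택 마지막값부터 비교
--         # 떨어지면 pop / 아니면 break
--         while stack:
--             val = stack[-1]
--             if prices[val] > cur:
--                 stack.pop()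
--             else:
--                 break
--         stack.append(now)   # 현재 가격 인덱스 추가
--         now += 1            # 다음 인덱스
--
--     return answer
-- ===== SOURCE B (Python) =====
-- def solution(prices):
--     n = len(prices)
--     answer = []
--     for i in range(n):
--         d = n - 1 - i
--         for j in range(i + 1, n):
--             if prices[j] < prices[i]:
--                 d = j - i
--                 break
--         answer.append(d)
--     return answer
-- ===== Notes on version B (the rewrite author's own statement) =====
-- stated objective: alternative
-- what changed: B drops A's stack-and-increment simulation entirely and computes each answer[i] independently as the distance to the first later strictly smaller price (n-1-i if none).
import Mathlib
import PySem

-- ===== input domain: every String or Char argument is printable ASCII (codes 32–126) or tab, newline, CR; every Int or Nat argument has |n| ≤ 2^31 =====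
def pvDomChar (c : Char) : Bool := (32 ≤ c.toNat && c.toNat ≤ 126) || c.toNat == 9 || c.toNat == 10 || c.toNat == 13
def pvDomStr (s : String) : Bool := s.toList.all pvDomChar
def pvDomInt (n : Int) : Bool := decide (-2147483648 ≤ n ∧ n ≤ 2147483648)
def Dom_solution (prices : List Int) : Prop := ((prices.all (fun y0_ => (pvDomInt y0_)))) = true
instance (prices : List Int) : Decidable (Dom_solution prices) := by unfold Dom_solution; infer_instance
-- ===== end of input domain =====

-- B drops A's stack-and-increment simulation and computes each answer[i] independently as
-- the distance to the first later strictly smaller price (n-1-i if none); objective: alternative.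

-- ===== PORT A =====
-- prices[i] for an index this program produces (always 0 ≤ i < len, so default never used)
def pyGetI (xs : List Int) (i : Int) : Int := PySem.List.pyGetD xs i 0
-- xs[i] = v; exact for 0 ≤ i < len xs, the only indices A reaches
def pySetI (xs : List Int) (i : Int) (v : Int) : List Int := xs.set i.toNat v

-- inner `while stack: val = stack[-1]; if prices[val] > cur: stack.pop() else: break`
-- (the stack is kept top-first: Python's append/pop/stack[-1] act on the head here)
def popA (prices : List Int) (cur : Int) : List Int → List Int
  | [] => []
  | v :: rest => if pyGetI prices v > cur then popA prices cur rest else v :: rest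

-- one iteration of A's `while now < len(prices)` body
def stepA (prices : List Int) (st : List Int × List Int) (now : Int) : List Int × List Int :=
  let cur := pyGetI prices now
  -- `for num in stack: answer[num] += 1` (bottom-to-top = .reverse of the top-first stack)
  let ans := st.2.reverse.foldl (fun a num => pySetI a num (pyGetI a num + 1)) st.1
  let stack := popA prices cur st.2
  (ans, now :: stack)

def solution (prices : List Int) : List Int :=
  ((PySem.List.pyRange 1 (prices.length : Int) 1).foldl (stepA prices)
    (List.replicate prices.length 0, [(0 : Int)])).1

-- ===== PORT B =====
-- `for j in range(i+1, n): if prices[j] < prices[i]: d = j - i; break`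
def innerB (prices : List Int) (pi_ i : Int) : List Int → Option Int
  | [] => none
  | j :: rest => if pyGetI prices j < pi_ then some (j - i) else innerB prices pi_ i rest

-- the loop over i with `answer.append(d)` becomes a map over the same range
def solution_alt (prices : List Int) : List Int :=
  (PySem.List.pyRange 0 (prices.length : Int) 1).map (fun i =>
    match innerB prices (pyGetI prices i) i
        (PySem.List.pyRange (i + 1) (prices.length : Int) 1) with
    | some d => d
    | none => (prices.length : Int) - 1 - i)

-- ===== PRECONDITION & SPEC =====
def Spec_solution (prices : List Int) (out : List Int) : Prop := out = solution_alt prices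
instance (prices : List Int) (out : List Int) : Decidable (Spec_solution prices out) := by unfold Spec_solution; infer_instance

-- ===== CLAIM (what is proved, stated in full; the proofs are below) =====
def Claim_equal_solution : Prop := ∀ (prices : List Int), Dom_solution prices → Spec_solution prices (solution prices)

-- ===== LEMMAS AND PROOFS =====

-- answer[k] / prices[k] as the proofs read them
def getA (a : List Int) (k : Nat) : Int := a.getD k 0

-- index of the first j ∈ [k+1, m) with prices[j] < prices[k]
def dropQ (prices : List Int) (k m : Nat) : Option Nat :=
  (List.range' (k+1) (m - (k+1))).find? (fun j => decide (getA prices j < getA prices k))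

lemma getA_pySetI (a : List Int) (j : Int) (v : Int) (k : Nat) (hj : 0 ≤ j)
    (hlt : j.toNat < a.length) :
    getA (pySetI a j v) k = if (k : Int) = j then v else getA a k := by
  unfold getA pySetI
  by_cases h : (k : Int) = j
  · have : j.toNat = k := by omega
    subst this
    simp [List.getD, h, hlt]
  · have hne : j.toNat ≠ k := by omega
    simp [List.getD, h, hne]

lemma length_pySetI (a : List Int) (j v : Int) : (pySetI a j v).length = a.length := by
  simp [pySetI]

lemma pyGetI_nonneg (a : List Int) (i : Int) (h : 0 ≤ i) : pyGetI a i = getA a i.toNat := by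
  simp [pyGetI, getA, PySem.List.pyGetD_of_nonneg a 0 h]

lemma length_foldl_pySetI (f : List Int → Int → Int) (L : List Int) (a : List Int) :
    (L.foldl (fun a i => pySetI a i (f a i)) a).length = a.length := by
  induction L generalizing a with
  | nil => rfl
  | cons j L ih => simp [List.foldl, ih, length_pySetI]

-- effect of A's increment loop on one cell
lemma getA_incr_foldl (L : List Int) (a : List Int) (k : Nat) (hnd : L.Nodup)
    (hb : ∀ j ∈ L, 0 ≤ j ∧ j.toNat < a.length) :
    getA (L.foldl (fun a num => pySetI a num (pyGetI a num + 1)) a) k =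
      if (k : Int) ∈ L then getA a k + 1 else getA a k := by
  induction L generalizing a with
  | nil => simp
  | cons j L ih =>
    obtain ⟨hj0, hjlt⟩ := hb j (by simp)
    have hset := getA_pySetI a j (pyGetI a j + 1) k hj0 hjlt
    have hread : pyGetI a j = getA a j.toNat := pyGetI_nonneg a j hj0
    have hlen : (pySetI a j (pyGetI a j + 1)).length = a.length := length_pySetI _ _ _
    have hb' : ∀ x ∈ L, 0 ≤ x ∧ x.toNat < (pySetI a j (pyGetI a j + 1)).length := by
      intro x hx; rw [hlen]; exact hb x (by simp [hx])
    have := ih (pySetI a j (pyGetI a j + 1)) hnd.of_cons hb'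
    rw [List.foldl_cons, this]
    by_cases hk : (k : Int) = j
    · have hknotin : (k : Int) ∉ L := by rw [hk]; exact (List.nodup_cons.mp hnd).1
      have hkj : j.toNat = k := by omega
      have hjL : j ∉ L := by rw [← hk]; exact hknotin
      simp [hk, hjL, hread, hkj]
      rw [getA_pySetI a j _ k hj0 hjlt, if_pos hk]
    · simp only [hset, if_neg hk, List.mem_cons]
      by_cases hkL : (k : Int) ∈ L <;> simp [hkL, hk]

-- A's pop loop on a price-antitone stack removes exactly the indices with price > cur
lemma popA_eq_filter (prices : List Int) (cur : Int) (S : List Int)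
    (hmono : List.Pairwise (fun a b => pyGetI prices b ≤ pyGetI prices a) S) :
    popA prices cur S = S.filter (fun v => decide (pyGetI prices v ≤ cur)) := by
  induction S with
  | nil => rfl
  | cons v S ih =>
    rcases List.pairwise_cons.mp hmono with ⟨hv, hS⟩
    by_cases h : pyGetI prices v > cur
    · have hne : ¬ pyGetI prices v ≤ cur := by omega
      simp [popA, h, hne, ih hS]
    · have hle : pyGetI prices v ≤ cur := by omega
      have hall : S.filter (fun v => decide (pyGetI prices v ≤ cur)) = S := by
        apply List.filter_eq_self.mpr
        intro x hx
        have := hv x hx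
        simp; omega
      simp [popA, h, hle, hall]

-- extending the search window by one index
lemma dropQ_succ (prices : List Int) (k m : Nat) (hk : k < m) :
    dropQ prices k (m+1) =
      (dropQ prices k m).or
        (if getA prices m < getA prices k then some m else none) := by
  unfold dropQ
  have h1 : m + 1 - (k+1) = (m - (k+1)) + 1 := by omega
  have h2 : k + 1 + (m - (k+1)) = m := by omega
  rw [h1, List.range'_concat, List.find?_append]
  simp only [Nat.one_mul]
  rw [h2]
  by_cases h : getA prices m < getA prices k <;> simp [List.find?, h]

lemma dropQ_self (prices : List Int) (m : Nat) : dropQ prices m (m+1) = none := by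
  unfold dropQ
  simp

-- the invariant maintained by A's outer loop, phrased against dropQ
def InvA (prices : List Int) (m : Nat) (st : List Int × List Int) : Prop :=
  st.1.length = prices.length ∧
  (∀ j ∈ st.2, 0 ≤ j ∧ j < (m : Int)) ∧
  st.2.Nodup ∧
  List.Pairwise (fun a b => pyGetI prices b ≤ pyGetI prices a) st.2 ∧
  (∀ k : Nat, k < m → ((k : Int) ∈ st.2 ↔ dropQ prices k m = none)) ∧
  ∀ k : Nat, k < prices.length →
    (k < m → (dropQ prices k m = none → getA st.1 k = (m : Int) - 1 - k) ∧
             (∀ j, dropQ prices k m = some j → getA st.1 k = (j : Int) - k)) ∧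
    (m ≤ k → getA st.1 k = 0)

lemma stepA_preserve (prices : List Int) (m : Nat) (st : List Int × List Int)
    (hm : m < prices.length) (h1 : 1 ≤ m) (hinv : InvA prices m st) :
    InvA prices (m+1) (stepA prices st (m : Int)) := by
  obtain ⟨hlen, hbnd, hnd, hmono, hmem, hcell⟩ := hinv
  have hcur : pyGetI prices (m : Int) = getA prices m := pyGetI_nonneg _ _ (by positivity)
  have hnd_rev : st.2.reverse.Nodup := List.nodup_reverse.mpr hnd
  have hbA : ∀ j ∈ st.2.reverse, 0 ≤ j ∧ j.toNat < st.1.length := by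
    intro j hj
    rw [List.mem_reverse] at hj
    obtain ⟨h0, hlt⟩ := hbnd j hj
    exact ⟨h0, by rw [hlen]; omega⟩
  have hA1 : ∀ k : Nat,
      getA (st.2.reverse.foldl (fun a num => pySetI a num (pyGetI a num + 1)) st.1) k =
        if (k : Int) ∈ st.2 then getA st.1 k + 1 else getA st.1 k := by
    intro k
    rw [getA_incr_foldl st.2.reverse st.1 k hnd_rev hbA]
    simp only [List.mem_reverse]
  have hpop := popA_eq_filter prices (pyGetI prices (m : Int)) st.2 hmono
  -- price of an index read through pyGetI equals its getA form for stack members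
  have hpj : ∀ j : Int, 0 ≤ j → pyGetI prices j = getA prices j.toNat :=
    fun j hj => pyGetI_nonneg _ _ hj
  constructor
  · -- length
    show (st.2.reverse.foldl (fun a num => pySetI a num (pyGetI a num + 1)) st.1).length = _
    rw [length_foldl_pySetI (fun a num => pyGetI a num + 1)]; exact hlen
  refine ⟨?_, ?_, ?_, ?_, ?_⟩
  · -- bounds
    intro j hj
    rcases List.mem_cons.mp hj with h | h
    · subst h; constructor <;> push_cast <;> omega
    · rw [hpop] at h
      obtain ⟨h0, hlt⟩ := hbnd j (List.mem_of_mem_filter h)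
      exact ⟨h0, by push_cast; omega⟩
  · -- nodup
    refine List.nodup_cons.mpr ⟨?_, ?_⟩
    · intro hx
      rw [hpop] at hx
      obtain ⟨_, hlt⟩ := hbnd _ (List.mem_of_mem_filter hx)
      omega
    · rw [hpop]; exact hnd.filter _
  · -- price-antitone
    refine List.pairwise_cons.mpr ⟨?_, ?_⟩
    · intro b hb
      rw [hpop] at hb
      have := List.of_mem_filter hb
      simp at this
      omega
    · rw [hpop]; exact hmono.filter _
  · -- membership ↔ dropQ = none
    intro k hk
    show (k : Int) ∈ (m : Int) :: popA prices (pyGetI prices (m : Int)) st.2 ↔ _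
    by_cases hkm : k = m
    · subst hkm
      simp [dropQ_self]
    · have hklt : k < m := by omega
      have hk0 : (0:Int) ≤ (k:Int) := by positivity
      rw [dropQ_succ prices k m hklt]
      have hne : (k : Int) ≠ (m : Int) := by exact_mod_cast hkm
      constructor
      · intro hx
        rcases List.mem_cons.mp hx with h | h
        · exact absurd h hne
        · rw [hpop] at h
          have hmemk : (k : Int) ∈ st.2 := List.mem_of_mem_filter h
          have hfk := List.of_mem_filter h
          have hnone := (hmem k hklt).mp hmemk
          rw [hnone]
          have : ¬ getA prices m < getA prices k := by
            simp [hcur, hpj (k:Int) hk0] at hfk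
            simpa [Int.toNat_natCast] using hfk
          simp [this]
      · intro hx
        rcases hor : dropQ prices k m with _ | j
        · have hcond : ¬ getA prices m < getA prices k := by
            rw [hor] at hx
            by_contra hc
            simp [hc] at hx
          have hmemk : (k : Int) ∈ st.2 := (hmem k hklt).mpr hor
          apply List.mem_cons_of_mem
          rw [hpop]
          apply List.mem_filter.mpr
          refine ⟨hmemk, ?_⟩
          simp [hcur, hpj (k:Int) hk0, Int.toNat_natCast]
          omega
        · rw [hor] at hx; simp at hx
  · -- cells
    intro k hk
    constructor
    · intro hklt1
      by_cases hkm : k = m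
      · subst hkm
        have hknot : (k : Int) ∉ st.2 := by
          intro hx; obtain ⟨_, hlt⟩ := hbnd _ hx; omega
        have h0 := (hcell k hk).2 (le_refl k)
        constructor
        · intro _
          show getA (st.2.reverse.foldl _ st.1) k = _
          rw [hA1 k, if_neg hknot, h0]; push_cast; ring
        · intro j hj
          rw [dropQ_self] at hj; cases hj
      · have hklt : k < m := by omega
        have hsucc := dropQ_succ prices k m hklt
        have hcells := (hcell k hk).1 hklt
        constructor
        · intro hnone
          rw [hsucc] at hnone
          have hnone0 : dropQ prices k m = none := by
            cases h : dropQ prices k m with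
            | none => rfl
            | some j => rw [h] at hnone; simp at hnone
          have hmemk : (k : Int) ∈ st.2 := (hmem k hklt).mpr hnone0
          show getA (st.2.reverse.foldl _ st.1) k = _
          rw [hA1 k, if_pos hmemk, hcells.1 hnone0]; push_cast; ring
        · intro j hj
          rw [hsucc] at hj
          cases h : dropQ prices k m with
          | some j' =>
            rw [h] at hj; simp at hj; subst hj
            have hknot : (k : Int) ∉ st.2 := by
              intro hx
              rw [(hmem k hklt).mp hx] at h; cases h
            show getA (st.2.reverse.foldl _ st.1) k = _
            rw [hA1 k, if_neg hknot]
            exact hcells.2 j' h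
          | none =>
            rw [h] at hj
            simp at hj
            obtain ⟨_, hjm⟩ := hj
            subst hjm
            have hmemk : (k : Int) ∈ st.2 := (hmem k hklt).mpr h
            show getA (st.2.reverse.foldl _ st.1) k = _
            rw [hA1 k, if_pos hmemk, hcells.1 h]; ring
    · intro hge
      have hknot : (k : Int) ∉ st.2 := by
        intro hx; obtain ⟨_, hlt⟩ := hbnd _ hx; omega
      show getA (st.2.reverse.foldl _ st.1) k = _
      rw [hA1 k, if_neg hknot]
      exact (hcell k hk).2 (by omega)

lemma foldA_preserve (prices : List Int) (c m : Nat) (st : List Int × List Int)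
    (h1 : 1 ≤ m) (hinv : InvA prices m st) (hc : m + c ≤ prices.length) :
    InvA prices (m + c)
      ((PySem.List.pyRange (m : Int) ((m + c : Nat) : Int) 1).foldl (stepA prices) st) := by
  induction c generalizing m st with
  | zero => simpa [PySem.List.pyRange_one_eq_nil] using hinv
  | succ c ih =>
    have hmlt : (m : Int) < ((m + (c+1) : Nat) : Int) := by push_cast; omega
    rw [PySem.List.pyRange_one_cons hmlt]
    simp only [List.foldl_cons]
    have := ih (m + 1) _ (by omega)
      (stepA_preserve prices m st (by omega) h1 hinv) (by omega)
    have h3 : m + 1 + c = m + (c + 1) := by omega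
    rw [h3] at this
    exact this

-- B's inner loop is find? over the Nat range, shifted by i
lemma innerB_eq_find (prices : List Int) (pk : Int) (i : Int) (s n : Nat) :
    innerB prices pk i (PySem.List.pyRange (s : Int) (n : Int) 1) =
      ((List.range' s (n - s)).find? (fun j => decide (getA prices j < pk))).map
        (fun j => (j : Int) - i) := by
  by_cases h : s < n
  · have hmlt : (s : Int) < (n : Int) := by exact_mod_cast h
    rw [PySem.List.pyRange_one_cons hmlt]
    have hns : n - s = (n - (s+1)) + 1 := by omega
    rw [hns, List.range'_succ]
    have hp : pyGetI prices (s : Int) = getA prices s := pyGetI_nonneg _ _ (by positivity)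
    by_cases hc : getA prices s < pk
    · simp [innerB, List.find?, hp, hc]
    · have hrec := innerB_eq_find prices pk i (s+1) n
      push_cast at hrec
      simp [innerB, List.find?, hp, hc, hrec]
  · have : ((n:Int) - s) ≤ 0 := by omega
    rw [PySem.List.pyRange_one_eq_nil (by omega)]
    have hns : n - s = 0 := by omega
    simp [innerB, hns]
termination_by n - s

-- solution_alt read at index k
lemma solution_alt_get (prices : List Int) (k : Nat) (hk : k < prices.length) :
    (solution_alt prices).getD k 0 =
      match dropQ prices k prices.length with
      | some j => (j : Int) - k
      | none => (prices.length : Int) - 1 - k := by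
  unfold solution_alt
  have hrange : PySem.List.pyRange 0 (prices.length : Int) 1 =
      (List.range prices.length).map (fun j : Nat => (j : Int)) := by
    rw [PySem.List.pyRange_one]
    simp
  rw [hrange, List.map_map]
  have hget : ∀ (f : Nat → Int),
      ((List.range prices.length).map f).getD k 0 = f k := by
    intro f
    simp [List.getD, hk]
  rw [hget]
  have hp : pyGetI prices (k : Int) = getA prices k := pyGetI_nonneg _ _ (by positivity)
  have := innerB_eq_find prices (getA prices k) (k : Int) (k+1) prices.length
  push_cast at this
  simp only [Function.comp, hp, this]
  unfold dropQ
  cases (List.range' (k+1) (prices.length - (k+1))).find?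
      (fun j => decide (getA prices j < getA prices k)) with
  | none => simp
  | some j => simp

lemma solution_alt_length (prices : List Int) :
    (solution_alt prices).length = prices.length := by
  unfold solution_alt
  rw [List.length_map, PySem.List.length_pyRange_one]; simp

lemma solution_length (prices : List Int) :
    (solution prices).length = prices.length := by
  unfold solution
  have : ∀ (L : List Int) (st : List Int × List Int),
      (L.foldl (stepA prices) st).1.length = st.1.length := by
    intro L
    induction L with
    | nil => intro st; rfl
    | cons x L ih =>
      intro st
      rw [List.foldl_cons, ih]
      show (stepA prices st x).1.length = _
      unfold stepA
      simp only
      rw [length_foldl_pySetI (fun a num => pyGetI a num + 1)]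
  rw [this]
  simp

-- ===== VERDICT (by name: the statement is the Claim_ definition above) =====
theorem solution_spec : Claim_equal_solution := by
  intro prices _
  unfold Spec_solution
  rcases Nat.eq_zero_or_pos prices.length with h0 | hpos
  · have h1 : prices = [] := List.length_eq_zero_iff.mp h0
    subst h1
    rfl
  · have hinv1 : InvA prices 1 (List.replicate prices.length 0, [(0 : Int)]) := by
      refine ⟨by simp, ?_, by simp, by simp, ?_, ?_⟩
      · intro j hj; simp at hj; omega
      · intro k hk
        have : k = 0 := by omega
        subst this
        simp [dropQ_self]
      · intro k hk
        constructor
        · intro hk1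
          have : k = 0 := by omega
          subst this
          constructor
          · intro _; simp [getA, List.getD, hk]
          · intro j hj; rw [show (1:Nat) = 0 + 1 from rfl, dropQ_self] at hj; cases hj
        · intro _; simp [getA, List.getD, hk]
    have hmain := foldA_preserve prices (prices.length - 1) 1 _ (le_refl 1) hinv1 (by omega)
    have heq : 1 + (prices.length - 1) = prices.length := by omega
    rw [heq] at hmain
    obtain ⟨hlenA, _, _, _, _, hcell⟩ := hmain
    apply List.ext_getElem
    · rw [solution_length, solution_alt_length]
    · intro k hk1 hk2
      have hk : k < prices.length := by rwa [solution_length] at hk1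
      have hA : (solution prices)[k] = getA (solution prices) k := by
        simp [getA, List.getD, List.getElem?_eq_getElem hk1]
      have hB : (solution_alt prices)[k] = (solution_alt prices).getD k 0 := by
        simp [List.getD, List.getElem?_eq_getElem hk2]
      rw [hA, hB, solution_alt_get prices k hk]
      have hcells := (hcell k hk).1 hk
      cases h : dropQ prices k prices.length with
      | none =>
        simp only
        exact hcells.1 h
      | some j =>
        simp only
        exact hcells.2 j h
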